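-- pv_equiv track=rewrite | github.com/sionyun/coding-test-practice | programmers/py/brute_force/모의고사.py | solution
-- ===== SOURCE A (Python) =====
-- def solution(answers):
--     supoja1 = [1,2,3,4,5]
--     supoja2 = [2,1,2,3,2,4,2,5]
--     supoja3 = [3,3,1,1,2,2,4,4,5,5]
--     scores = [0, 0, 0]
--     answer = []
--
--     for i in range(len(answers)):
--         if answers[i] == supoja1[i%len(supoja1)]:
--             scores[0] += 1
--         if answers[i] == supoja2[i%len(supoja2)]:
--             scores[1] += 1
--         if answers[i] == supoja3[i%len(supoja3)]:
--             scores[2] += 1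
--
--     max_score = max(scores)
--
--     for s in range(len(scores)):
--         if scores[s] == max_score:
--             answer.append(s + 1)
--
--     return answer
-- ===== SOURCE B (Python) =====
-- def solution(answers):
--     # Histogram approach: bucket the answers by (index mod 40, value) in one
--     # comparison-free pass (40 = lcm of the pattern lengths), then read each
--     # student's score off the histogram with 40 lookups.
--     PERIOD = 40
--     cnt = {}
--     for i, a in enumerate(answers):
--         key = (i % PERIOD, a)
--         cnt[key] = cnt.get(key, 0) + 1
--     patterns = [[1, 2, 3, 4, 5],
--                 [2, 1, 2, 3, 2, 4, 2, 5],
--                 [3, 3, 1, 1, 2, 2, 4, 4, 5, 5]]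
--     scores = [sum(cnt.get((r, p[r % len(p)]), 0) for r in range(PERIOD))
--               for p in patterns]
--     best = max(scores)
--     return [k + 1 for k in range(3) if scores[k] == best]
-- ===== Notes on version B (the rewrite author's own statement) =====
-- stated objective: alternative
-- what changed: B replaces A's per-element comparison against the three patterns by a comparison-free bucketing pass: it builds a histogram dict keyed by (index mod 40, answer) (40 = lcm of the pattern lengths), then derives each score from 40 dict lookups, instead of A's fused loop testing all three patterns at every index.
import Mathlib
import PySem

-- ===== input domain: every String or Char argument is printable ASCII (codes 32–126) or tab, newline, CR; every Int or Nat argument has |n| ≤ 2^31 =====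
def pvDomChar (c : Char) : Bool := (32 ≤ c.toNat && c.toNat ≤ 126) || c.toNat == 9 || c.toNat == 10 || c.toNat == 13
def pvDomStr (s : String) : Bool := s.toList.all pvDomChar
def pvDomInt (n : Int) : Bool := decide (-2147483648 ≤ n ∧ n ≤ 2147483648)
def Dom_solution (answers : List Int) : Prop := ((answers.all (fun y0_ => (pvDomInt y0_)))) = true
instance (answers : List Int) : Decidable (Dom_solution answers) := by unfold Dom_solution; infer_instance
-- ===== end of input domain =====

-- B buckets the answers by (index mod 40, value) into a histogram dict in one
-- comparison-free pass and reads each score off it with 40 lookups (objective: alternative).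

-- ===== PORT A =====
-- A's fused loop updates the three cells of `scores`; ported as a fold carrying the
-- triple of cells, rebuilt into the list `scoresL` after the loop.
def solution (answers : List Int) : List Int :=
  let supoja1 : List Int := [1, 2, 3, 4, 5]
  let supoja2 : List Int := [2, 1, 2, 3, 2, 4, 2, 5]
  let supoja3 : List Int := [3, 3, 1, 1, 2, 2, 4, 4, 5, 5]
  let scores : Int × Int × Int :=
    (PySem.List.pyRange 0 (PySem.List.len answers) 1).foldl
      (fun sc i =>
        let s0 := if PySem.List.pyGetD answers i 0 ==
            PySem.List.pyGetD supoja1 (PySem.Int.mod i (PySem.List.len supoja1)) 0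
          then sc.1 + 1 else sc.1
        let s1 := if PySem.List.pyGetD answers i 0 ==
            PySem.List.pyGetD supoja2 (PySem.Int.mod i (PySem.List.len supoja2)) 0
          then sc.2.1 + 1 else sc.2.1
        let s2 := if PySem.List.pyGetD answers i 0 ==
            PySem.List.pyGetD supoja3 (PySem.Int.mod i (PySem.List.len supoja3)) 0
          then sc.2.2 + 1 else sc.2.2
        (s0, s1, s2))
      (0, 0, 0)
  let scoresL : List Int := [scores.1, scores.2.1, scores.2.2]
  let maxScore : Int := (PySem.List.max? scoresL (fun y => y)).getD 0
  (PySem.List.pyRange 0 (PySem.List.len scoresL) 1).foldl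
    (fun answer s =>
      if PySem.List.pyGetD scoresL s 0 == maxScore then answer ++ [s + 1] else answer)
    []

-- ===== PORT B =====
-- key = (i % 40, a)
def pvKey (ia : Int × Int) : Int × Int := (PySem.Int.mod ia.1 40, ia.2)

def solution_alt (answers : List Int) : List Int :=
  let cnt : PySem.Dict (Int × Int) Int :=
    (PySem.List.enumerate answers 0).foldl
      (fun d ia => d.insert (pvKey ia) (d.getD (pvKey ia) 0 + 1))
      PySem.Dict.empty
  let patterns : List (List Int) :=
    [[1, 2, 3, 4, 5], [2, 1, 2, 3, 2, 4, 2, 5], [3, 3, 1, 1, 2, 2, 4, 4, 5, 5]]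
  let scores : List Int := patterns.map (fun p =>
    ((PySem.List.pyRange 0 40 1).map (fun r =>
        cnt.getD (r, PySem.List.pyGetD p (PySem.Int.mod r (PySem.List.len p)) 0) 0)).sum)
  let best : Int := (PySem.List.max? scores (fun y => y)).getD 0
  ((PySem.List.pyRange 0 3 1).filter (fun k => PySem.List.pyGetD scores k 0 == best)).map
    (fun k => k + 1)

-- ===== PRECONDITION & SPEC =====
def Spec_solution (answers : List Int) (out : List Int) : Prop := out = solution_alt answers
instance (answers : List Int) (out : List Int) : Decidable (Spec_solution answers out) := by unfold Spec_solution; infer_instance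

-- ===== CLAIM (what is proved, stated in full; the proofs are below) =====
def Claim_equal_solution : Prop := ∀ (answers : List Int), Dom_solution answers → Spec_solution answers (solution answers)

-- ===== LEMMAS AND PROOFS =====

-- A's triple-carrying fold splits into three independent component folds.
theorem pv_fold_split (L : List Int) (f0 f1 f2 : Int → Bool) (a b c : Int) :
    L.foldl
      (fun (sc : Int × Int × Int) i =>
        (if f0 i then sc.1 + 1 else sc.1,
         if f1 i then sc.2.1 + 1 else sc.2.1,
         if f2 i then sc.2.2 + 1 else sc.2.2))
      (a, b, c)
    = (L.foldl (fun s i => if f0 i then s + 1 else s) a,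
       L.foldl (fun s i => if f1 i then s + 1 else s) b,
       L.foldl (fun s i => if f2 i then s + 1 else s) c) := by
  induction L generalizing a b c with
  | nil => rfl
  | cons x t ih => simp [List.foldl, ih]

-- sum over a Nodup list R of the indicator "x = (r, tgt r)" is the indicator
-- "x.2 = tgt x.1", provided x.1 ∈ R.
theorem pv_sum_indicator (R : List Int) (tgt : Int → Int) (x : Int × Int)
    (hR : R.Nodup) (hx : x.1 ∈ R) :
    (R.map (fun r => (if x = (r, tgt r) then (1 : Int) else 0))).sum
      = if x.2 = tgt x.1 then 1 else 0 := by
  induction R with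
  | nil => cases hx
  | cons r R' ih =>
    rcases List.mem_cons.mp hx with h | h
    · have hzero : (R'.map (fun r => (if x = (r, tgt r) then (1 : Int) else 0))).sum = 0 := by
        apply List.sum_eq_zero
        intro y hy
        rcases List.mem_map.mp hy with ⟨r', hr', hyy⟩
        have hne : x ≠ (r', tgt r') := by
          intro he
          have hx1 : x.1 = r' := by rw [he]
          exact (List.nodup_cons.mp hR).1 (by rw [h.symm.trans hx1]; exact hr')
        simp [← hyy, hne]
      have hxr : (x = (r, tgt r)) ↔ (x.2 = tgt x.1) := by
        constructor
        · intro he; rw [he]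
        · intro he; exact Prod.ext h (by rw [he, h])
      simp only [List.map_cons, List.sum_cons, hzero, add_zero]
      by_cases hc : x.2 = tgt x.1 <;> simp [hxr, hc]
    · have hne : x ≠ (r, tgt r) := by
        intro he
        have hx1 : x.1 = r := by rw [he]
        exact (List.nodup_cons.mp hR).1 (hx1 ▸ h)
      simp only [List.map_cons, List.sum_cons, hne, if_false, zero_add]
      exact ih (List.nodup_cons.mp hR).2 h

-- Summing L.count (r, tgt r) over a Nodup R covering all first components of L
-- counts exactly the pairs with x.2 = tgt x.1.
theorem pv_sum_count (L : List (Int × Int)) (R : List Int) (tgt : Int → Int)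
    (hR : R.Nodup) (hmem : ∀ x ∈ L, x.1 ∈ R) :
    (R.map (fun r => ((L.count ((r, tgt r))) : Int))).sum
      = ((L.countP (fun x => x.2 == tgt x.1)) : Int) := by
  induction L with
  | nil => simp
  | cons x t ih =>
    have hx : x.1 ∈ R := hmem x List.mem_cons_self
    have ht : ∀ y ∈ t, y.1 ∈ R := fun y hy => hmem y (List.mem_cons_of_mem x hy)
    have hcnt : ∀ r : Int, ((List.count (r, tgt r) (x :: t)) : Int)
        = ((List.count (r, tgt r) t) : Int) + (if x = (r, tgt r) then 1 else 0) := by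
      intro r
      rw [List.count_cons]
      by_cases h : x = (r, tgt r) <;> simp [h]
    have : (R.map (fun r => ((List.count (r, tgt r) (x :: t)) : Int))).sum
        = (R.map (fun r => ((List.count (r, tgt r) t) : Int))).sum
          + (R.map (fun r => (if x = (r, tgt r) then (1 : Int) else 0))).sum := by
      rw [← List.sum_map_add]
      exact congrArg List.sum (List.map_congr_left (fun r _ => hcnt r))
    rw [this, ih ht, pv_sum_indicator R tgt x hR hx, List.countP_cons]
    by_cases h : x.2 = tgt x.1 <;> simp [h]

-- Every index produced by enumerate … 0 is nonnegative.
theorem pv_enum_fst_nonneg (answers : List Int) (ia : Int × Int)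
    (h : ia ∈ PySem.List.enumerate answers 0) : 0 ≤ ia.1 := by
  have := congrArg (fun l => ia.1 ∈ l) (PySem.List.map_fst_enumerate answers 0)
  have hmem : ia.1 ∈ PySem.List.pyRange 0 (0 + (answers.length : Int)) 1 := by
    rw [← PySem.List.map_fst_enumerate answers 0]
    exact List.mem_map_of_mem h
  exact (PySem.List.mem_pyRange_one.mp hmem).1

-- B's histogram score for a pattern p (whose length divides 40) equals the direct
-- match count over enumerate.
theorem pv_score_eq (answers p : List Int) (hp : (PySem.List.len p) ∣ 40)
    (hp0 : 0 < PySem.List.len p) :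
    ((PySem.List.pyRange 0 40 1).map (fun r =>
        (((PySem.List.enumerate answers 0).foldl
            (fun d ia => d.insert (pvKey ia) (d.getD (pvKey ia) 0 + 1))
            PySem.Dict.empty).getD
          (r, PySem.List.pyGetD p (PySem.Int.mod r (PySem.List.len p)) 0) 0))).sum
      = (((PySem.List.enumerate answers 0).countP
            (fun ia => ia.2 == PySem.List.pyGetD p (PySem.Int.mod ia.1 (PySem.List.len p)) 0)) : Int) := by
  set E := PySem.List.enumerate answers 0 with hE
  set tgt : Int → Int := fun r => PySem.List.pyGetD p (PySem.Int.mod r (PySem.List.len p)) 0 with htgt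
  have hget : ∀ r : Int,
      ((E.foldl (fun d ia => d.insert (pvKey ia) (d.getD (pvKey ia) 0 + 1))
          PySem.Dict.empty).getD (r, tgt r) 0)
        = ((E.map pvKey).count (r, tgt r) : Int) := by
    intro r
    have h2 := PySem.Dict.getD_foldl_insert_add_one (E.map pvKey) PySem.Dict.empty (r, tgt r)
    rw [List.foldl_map, PySem.Dict.getD_empty, zero_add] at h2
    exact h2
  have hmem : ∀ x ∈ E.map pvKey, x.1 ∈ PySem.List.pyRange 0 40 1 := by
    intro x hx
    rcases List.mem_map.mp hx with ⟨ia, hia, hxe⟩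
    rw [← hxe]
    exact PySem.List.mem_pyRange_one.mpr
      ⟨PySem.Int.mod_nonneg ia.1 (by norm_num), PySem.Int.mod_lt ia.1 (by norm_num)⟩
  calc ((PySem.List.pyRange 0 40 1).map (fun r =>
          ((E.foldl (fun d ia => d.insert (pvKey ia) (d.getD (pvKey ia) 0 + 1))
              PySem.Dict.empty).getD (r, tgt r) 0))).sum
      = ((PySem.List.pyRange 0 40 1).map (fun r => ((E.map pvKey).count (r, tgt r) : Int))).sum := by
        exact congrArg List.sum (List.map_congr_left (fun r _ => hget r))
    _ = (((E.map pvKey).countP (fun x => x.2 == tgt x.1)) : Int) :=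
        pv_sum_count (E.map pvKey) (PySem.List.pyRange 0 40 1) tgt
          (PySem.List.nodup_pyRange_one 0 40) hmem
    _ = ((E.countP (fun ia => ia.2 == tgt (PySem.Int.mod ia.1 40))) : Int) := by
        rw [List.countP_map]; rfl
    _ = ((E.countP (fun ia => ia.2 == tgt ia.1)) : Int) := by
        congr 1
        apply List.countP_congr
        intro ia hia
        have h0 : 0 ≤ ia.1 := pv_enum_fst_nonneg answers ia (hE ▸ hia)
        have hmm : PySem.Int.mod (PySem.Int.mod ia.1 40) (PySem.List.len p)
            = PySem.Int.mod ia.1 (PySem.List.len p) := by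
          rw [PySem.Int.mod_eq_emod_of_pos (by norm_num : (0:Int) < 40),
              PySem.Int.mod_eq_emod_of_pos hp0, PySem.Int.mod_eq_emod_of_pos hp0]
          exact Int.emod_emod_of_dvd ia.1 hp
        simp only [htgt, hmm]

-- One component of A's fold is the direct match count.
theorem pv_component_eq (answers p : List Int) :
    (PySem.List.pyRange 0 (PySem.List.len answers) 1).foldl
      (fun s i =>
        if PySem.List.pyGetD answers i 0 ==
            PySem.List.pyGetD p (PySem.Int.mod i (PySem.List.len p)) 0
        then s + 1 else s)
      0
    = (((PySem.List.enumerate answers 0).countP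
          (fun ia => ia.2 == PySem.List.pyGetD p (PySem.Int.mod ia.1 (PySem.List.len p)) 0)) : Int) := by
  rw [PySem.List.enumerate_eq_map_pyRange (d := 0), List.countP_map]
  rw [PySem.List.foldl_if_add_one, zero_add]
  rfl

-- The max-then-select tail agrees on any concrete triple of scores.
theorem pv_tail (c1 c2 c3 : Int) :
    (PySem.List.pyRange 0 (PySem.List.len [c1, c2, c3]) 1).foldl
      (fun answer s =>
        if PySem.List.pyGetD [c1, c2, c3] s 0 ==
            (PySem.List.max? [c1, c2, c3] (fun y => y)).getD 0
        then answer ++ [s + 1] else answer)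
      []
    = ((PySem.List.pyRange 0 3 1).filter
        (fun k => PySem.List.pyGetD [c1, c2, c3] k 0 ==
          (PySem.List.max? [c1, c2, c3] (fun y => y)).getD 0)).map
        (fun k => k + 1) := by
  have hl : PySem.List.len [c1, c2, c3] = 3 := by simp [PySem.List.len]
  have hr : PySem.List.pyRange 0 3 1 = [0, 1, 2] := by decide
  rw [hl, hr]
  set m := (PySem.List.max? [c1, c2, c3] (fun y => y)).getD 0 with hm
  by_cases h1 : c1 = m <;> by_cases h2 : c2 = m <;> by_cases h3 : c3 = m <;>
    simp [PySem.List.pyGetD, PySem.List.pyGet?, PySem.List.pyIdx?, List.foldl, h1, h2, h3]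

-- ===== VERDICT (by name: the statement is the Claim_ definition above) =====
theorem solution_spec : Claim_equal_solution := by
  intro answers _
  unfold Spec_solution solution solution_alt
  simp only [pv_fold_split, pv_component_eq, List.map]
  rw [pv_score_eq answers [1, 2, 3, 4, 5] (by decide) (by decide),
      pv_score_eq answers [2, 1, 2, 3, 2, 4, 2, 5] (by decide) (by decide),
      pv_score_eq answers [3, 3, 1, 1, 2, 2, 4, 4, 5, 5] (by decide) (by decide)]
  exact pv_tail _ _ _
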